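-- pv_equiv track=rewrite | github.com/charliegeannew/codeSpaceGit | leetcode/unfinish/488.py | simpStr
-- ===== SOURCE A (Python) =====
-- def simpStr(string:str)->str:
--     if len(string)>2:
--         i=0
--         while i<=len(string)-2:
--             j=i+1
--             while string[i]==string[j]:
--                 j+=1
--                 if j==len(string):
--                     break
--             if j-i>2:
--                 string=string[:i]+string[j:]
--                 i=0
--             else:
--                 i=j
--     return string
-- ===== SOURCE B (Python) =====
-- def simpStr(string: str) -> str:
--     # One pass with a stack of (char, run length); a completed run of length >= 3
--     # is dropped and its neighbours merge.
--     stack = []  # list of (char, count)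
--     for c in string:
--         if stack and stack[-1][0] == c:
--             stack[-1] = (c, stack[-1][1] + 1)
--         else:
--             if stack and stack[-1][1] >= 3:
--                 stack.pop()
--             if stack and stack[-1][0] == c:
--                 stack[-1] = (c, stack[-1][1] + 1)
--             else:
--                 stack.append((c, 1))
--     if stack and stack[-1][1] >= 3:
--         stack.pop()
--     return ''.join(ch * cnt for ch, cnt in stack)
-- ===== Notes on version B (the rewrite author's own statement) =====
-- stated objective: faster
-- what changed: A repeatedly rescans from index 0, deleting the leftmost run of >=3 equal chars and rebuilding the string each time; B makes a single left-to-right pass with a stack of (char, run-length) pairs, dropping a completed run of length >=3 and merging its neighbours.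
import Mathlib
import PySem

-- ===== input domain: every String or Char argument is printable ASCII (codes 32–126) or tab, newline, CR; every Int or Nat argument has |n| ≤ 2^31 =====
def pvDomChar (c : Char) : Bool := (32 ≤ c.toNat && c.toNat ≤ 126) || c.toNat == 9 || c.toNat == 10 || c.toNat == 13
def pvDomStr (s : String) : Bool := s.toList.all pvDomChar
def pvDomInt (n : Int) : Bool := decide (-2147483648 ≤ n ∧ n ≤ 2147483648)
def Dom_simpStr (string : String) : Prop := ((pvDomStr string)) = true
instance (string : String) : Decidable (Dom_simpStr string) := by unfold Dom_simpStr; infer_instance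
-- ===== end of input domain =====

-- B replaces A's rescan-from-index-0 deletion loop by a single left-to-right pass
-- with a stack of (char, run length) pairs (objective: faster).

-- ===== PORT A =====
-- inner loop 'while string[i]==string[j]: j+=1; if j==len(string): break'.
-- The conjunct 'j < s.length' only totalizes the recursion: A reaches the
-- comparison only with j < len, and there s[i]? = s[j]? is exactly Python's
-- string[i]==string[j] (i < j < len, both lookups succeed).
def pvFindJ (s : List Char) (i j : Nat) : Nat :=
  if h : j < s.length ∧ s[i]? = s[j]? then
    if j + 1 = s.length then j + 1
    else pvFindJ s i (j + 1)
  else j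
termination_by s.length - j
decreasing_by omega

-- termination facts for pvLoopA, cited in its decreasing_by
theorem pvFindJ_ge (s : List Char) (i j : Nat) : j ≤ pvFindJ s i j := by
  fun_induction pvFindJ s i j with
  | case1 j h heq => omega
  | case2 j h hne ih => omega
  | case3 j h => omega

theorem pvFindJ_le (s : List Char) (i j : Nat) (hj : j ≤ s.length) :
    pvFindJ s i j ≤ s.length := by
  revert hj
  fun_induction pvFindJ s i j with
  | case1 j h heq => omega
  | case2 j h hne ih => intro _; exact ih (by omega)
  | case3 j _h => intro h'; exact h'

-- the outer 'while i<=len(string)-2' loop; 'string=string[:i]+string[j:]' is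
-- take i ++ drop j (0 ≤ i ≤ j ≤ len throughout, so the Python slices are
-- exactly these, cf. PySem.List.slice_to_natCast/slice_from_natCast).
def pvLoopA (s : List Char) (i : Nat) : List Char :=
  if _h : i + 2 ≤ s.length then
    let j := pvFindJ s i (i + 1)
    if 2 < j - i then pvLoopA (s.take i ++ s.drop j) 0
    else pvLoopA s j
  else s
termination_by (s.length, s.length - i)
decreasing_by
  · have h1 := pvFindJ_ge s i (i + 1)
    have h2 := pvFindJ_le s i (i + 1) (by omega)
    refine Prod.Lex.left _ _ ?_
    simp only [List.length_append, List.length_take, List.length_drop]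
    omega
  · have h1 := pvFindJ_ge s i (i + 1)
    have h2 := pvFindJ_le s i (i + 1) (by omega)
    exact Prod.Lex.right _ (by omega)

def simpStr (string : String) : String :=
  if 2 < string.toList.length then String.ofList (pvLoopA string.toList 0) else string

-- ===== PORT B =====
-- one step of Source B's for-loop; the stack top is the HEAD of the list
def pvStep (st : List (Char × Nat)) (c : Char) : List (Char × Nat) :=
  match st with
  | (d, k) :: rest =>
    if d = c then (d, k + 1) :: rest
    else if 3 ≤ k then
      -- pop the finished run, then merge with the exposed top or push
      match rest with
      | (e, m) :: rest' => if e = c then (e, m + 1) :: rest' else (c, 1) :: rest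
      | [] => [(c, 1)]
    else (c, 1) :: (d, k) :: rest
  | [] => [(c, 1)]

-- the final 'if stack and stack[-1][1] >= 3: stack.pop()'
def pvPeel (st : List (Char × Nat)) : List (Char × Nat) :=
  match st with
  | (d, k) :: rest => if 3 ≤ k then rest else (d, k) :: rest
  | [] => []

-- ''.join(ch * cnt for ch, cnt in stack): bottom-to-top = reverse of our list
def pvRender (st : List (Char × Nat)) : List Char :=
  st.reverse.flatMap (fun p => List.replicate p.2 p.1)

def simpStr_alt (string : String) : String :=
  String.ofList (pvRender (pvPeel (string.toList.foldl pvStep [])))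

-- ===== PRECONDITION & SPEC =====
def Spec_simpStr (string : String) (out : String) : Prop := out = simpStr_alt string
instance (string : String) (out : String) : Decidable (Spec_simpStr string out) := by unfold Spec_simpStr; infer_instance

-- ===== CLAIM (what is proved, stated in full; the proofs are below) =====
def Claim_equal_simpStr : Prop := ∀ (string : String), Dom_simpStr string → Spec_simpStr string (simpStr string)

-- ===== LEMMAS AND PROOFS =====

-- B's result, on the character-list level
def pvB (u : List Char) : List Char := pvRender (pvPeel (u.foldl pvStep []))

-- run-length encoding of u (last run first), built with no deletions
def pvRunStep (st : List (Char × Nat)) (a : Char) : List (Char × Nat) :=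
  match st with
  | (d, k) :: r => if d = a then (d, k + 1) :: r else (a, 1) :: (d, k) :: r
  | [] => [(a, 1)]

def pvRuns (u : List Char) : List (Char × Nat) := u.foldl pvRunStep []

-- a run of ≥ 3 equal characters starts at position t
def pvTriple (s : List Char) (t : Nat) : Prop :=
  ∃ c, s[t]? = some c ∧ s[t + 1]? = some c ∧ s[t + 2]? = some c

-- no such run starts before position i
def pvTF (s : List Char) (i : Nat) : Prop := ∀ t, t < i → ¬ pvTriple s t


theorem pvRuns_append (u : List Char) (a : Char) :
    pvRuns (u ++ [a]) = pvRunStep (pvRuns u) a := by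
  simp [pvRuns, List.foldl_append]

theorem pvRender_cons (p : Char × Nat) (st : List (Char × Nat)) :
    pvRender (p :: st) = pvRender st ++ List.replicate p.2 p.1 := by
  simp [pvRender]

-- rendering the run encoding gives back the string
theorem pvRender_runs (u : List Char) : pvRender (pvRuns u) = u := by
  induction u using List.reverseRecOn with
  | nil => simp [pvRuns, pvRender]
  | append_singleton u a ih =>
    rw [pvRuns_append]
    cases hru : pvRuns u with
    | nil =>
      rw [hru] at ih
      simp only [pvRender, List.reverse_nil, List.flatMap_nil] at ih
      simp [pvRunStep, pvRender, ← ih]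
    | cons p r =>
      obtain ⟨d, k⟩ := p
      rw [hru] at ih
      by_cases hda : d = a
      · subst hda
        simp only [pvRunStep, if_true]
        rw [pvRender_cons] at ih
        rw [pvRender_cons]
        simp only [List.replicate_succ' (n := k)]
        rw [← List.append_assoc]
        simp only at ih ⊢
        rw [ih]
      · simp only [pvRunStep, if_neg hda]
        rw [pvRender_cons, ih]
        simp

-- the top entry of the run encoding is the (nonempty) final run of u
theorem pvRuns_top (u : List Char) (d : Char) (k : Nat) (r : List (Char × Nat))
    (h : pvRuns u = (d, k) :: r) : 1 ≤ k ∧ ∃ w, u = w ++ List.replicate k d := by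
  induction u using List.reverseRecOn generalizing d k r with
  | nil => simp [pvRuns] at h
  | append_singleton u a ih =>
    rw [pvRuns_append] at h
    cases hru : pvRuns u with
    | nil =>
      rw [hru] at h
      simp only [pvRunStep] at h
      simp only [List.cons.injEq, Prod.mk.injEq] at h
      obtain ⟨⟨h1, h2⟩, h3⟩ := h
      have hu : u = [] := by
        have := pvRender_runs u
        rw [hru] at this
        simpa [pvRender] using this.symm
      exact ⟨by omega, [], by simp [hu, ← h1, ← h2]⟩
    | cons p r' =>
      obtain ⟨d', k'⟩ := p
      rw [hru] at h
      by_cases hda : d' = a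
      · subst hda
        simp only [pvRunStep, if_true, List.cons.injEq,
          Prod.mk.injEq] at h
        obtain ⟨⟨hd, hk⟩, hr⟩ := h
        obtain ⟨hk1, w, hw⟩ := ih d' k' r' hru
        refine ⟨by omega, w, ?_⟩
        rw [hw, ← hk, ← hd]
        simp [List.replicate_succ' (n := k'), ← List.append_assoc]
      · simp only [pvRunStep, if_neg hda, List.cons.injEq, Prod.mk.injEq] at h
        obtain ⟨⟨hd, hk⟩, hr⟩ := h
        exact ⟨by omega, u, by simp [← hd, ← hk]⟩

theorem pvStack_append (u : List Char) (a : Char) :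
    (u ++ [a]).foldl pvStep [] = pvStep (u.foldl pvStep []) a := by
  simp [List.foldl_append]

-- while every run has length ≤ 2, the deleting stack equals the run encoding
theorem pvStack_eq_runs (u : List Char) (h : ∀ p ∈ pvRuns u, p.2 ≤ 2) :
    u.foldl pvStep [] = pvRuns u := by
  induction u using List.reverseRecOn with
  | nil => simp [pvRuns]
  | append_singleton u a ih =>
    rw [pvStack_append, pvRuns_append]
    have hu : ∀ p ∈ pvRuns u, p.2 ≤ 2 := by
      intro p hp
      rw [pvRuns_append] at h
      cases hru : pvRuns u with
      | nil => rw [hru] at hp; simp at hp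
      | cons q r =>
        obtain ⟨d, k⟩ := q
        rw [hru] at hp h
        by_cases hda : d = a
        · subst hda
          simp only [pvRunStep, if_true] at h
          rcases List.mem_cons.mp hp with h1 | h1
          · have h2 := h (d, k + 1) (by simp)
            simp only at h2
            rw [h1]; simp; omega
          · exact h p (by simp [h1])
        · simp only [pvRunStep, if_neg hda] at h
          exact h p (by simp [hp])
    rw [ih hu]
    cases hru : pvRuns u with
    | nil => simp [pvStep, pvRunStep]
    | cons q r =>
      obtain ⟨d, k⟩ := q
      by_cases hda : d = a
      · subst hda; simp [pvStep, pvRunStep]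
      · have hk2 : k ≤ 2 := by
          have := hu (d, k) (by simp [hru]); simpa using this
        simp [pvStep, pvRunStep, hda, show ¬ 3 ≤ k by omega]

-- triple-freeness bounds every run length by 2
theorem pvRuns_le_two (u : List Char) (h : pvTF u u.length) :
    ∀ p ∈ pvRuns u, p.2 ≤ 2 := by
  induction u using List.reverseRecOn with
  | nil => simp [pvRuns]
  | append_singleton u a ih =>
    have hu : pvTF u u.length := by
      intro t ht htr
      obtain ⟨c, h0, h1, h2⟩ := htr
      have l2 : t + 2 < u.length := (List.getElem?_eq_some_iff.mp h2).1
      refine h t (by simp; omega) ⟨c, ?_, ?_, ?_⟩ <;>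
        rw [List.getElem?_append_left (by omega)] <;> assumption
    intro p hp
    rw [pvRuns_append] at hp
    cases hru : pvRuns u with
    | nil => rw [hru] at hp; simp [pvRunStep] at hp; simp [hp]
    | cons q r =>
      obtain ⟨d, k⟩ := q
      rw [hru] at hp
      by_cases hda : d = a
      · subst hda
        simp only [pvRunStep, if_true] at hp
        rcases List.mem_cons.mp hp with h1 | h1
        · obtain ⟨hk1, w, hw⟩ := pvRuns_top u d k r hru
          by_cases hk : k ≤ 1
          · rw [h1]; simp; omega
          · exfalso
            have hk2 : 2 ≤ k := by omega
            have hufull : u ++ [d] = w ++ List.replicate (k + 1) d := by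
              rw [hw, List.replicate_succ' (n := k)]
              simp [List.append_assoc]
            have key : ∀ i, i < k + 1 → (u ++ [d])[w.length + i]? = some d := by
              intro i hi
              rw [hufull, List.getElem?_append_right (by omega)]
              simp [hi]
            have hlen : u.length = w.length + k := by simp [hw]
            apply h w.length (by simp; omega)
            refine ⟨d, by simpa using key 0 (by omega), key 1 (by omega),
              key 2 (by omega)⟩
        · exact ih hu p (by rw [hru]; simp [h1])
      · simp only [pvRunStep, if_neg hda] at hp
        rcases List.mem_cons.mp hp with h1 | h1
        · simp [h1]
        · exact ih hu p (by rw [hru]; exact h1)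

-- B is the identity on triple-free strings
theorem pvB_of_TF (s : List Char) (h : pvTF s s.length) : pvB s = s := by
  have hle := pvRuns_le_two s h
  unfold pvB
  rw [pvStack_eq_runs s hle]
  have hpeel : pvPeel (pvRuns s) = pvRuns s := by
    cases hru : pvRuns s with
    | nil => simp [pvPeel]
    | cons p r =>
      obtain ⟨d, k⟩ := p
      have h2 := hle (d, k) (by simp [hru])
      simp only at h2
      simp [pvPeel, show ¬ 3 ≤ k by omega]
  rw [hpeel, pvRender_runs]

-- feeding m copies of c into a stack whose top run is c
theorem pvStep_replicate (m k : Nat) (c : Char) (S : List (Char × Nat)) :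
    (List.replicate m c).foldl pvStep ((c, k) :: S) = (c, k + m) :: S := by
  induction m generalizing k with
  | zero => simp
  | succ m ih =>
    rw [List.replicate_succ]
    simp only [List.foldl_cons, pvStep, if_true]
    rw [ih]
    ring_nf

-- admissible stack under c: empty, or an unfinished top run of another char
def pvOkUnder (S : List (Char × Nat)) (c : Char) : Prop :=
  S = [] ∨ ∃ d k r, S = (d, k) :: r ∧ d ≠ c ∧ k < 3

theorem pvStep_push (c : Char) (S : List (Char × Nat)) (hS : pvOkUnder S c) :
    pvStep S c = (c, 1) :: S := by
  rcases hS with h | ⟨d, k, r, h, hd, hk⟩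
  · simp [h, pvStep]
  · simp [h, pvStep, hd, show ¬ 3 ≤ k by omega]

theorem pvStep_run (m : Nat) (hm : 1 ≤ m) (c : Char) (S : List (Char × Nat))
    (hS : pvOkUnder S c) :
    (List.replicate m c).foldl pvStep S = (c, m) :: S := by
  obtain ⟨m', rfl⟩ : ∃ m', m = m' + 1 := ⟨m - 1, by omega⟩
  rw [List.replicate_succ, List.foldl_cons, pvStep_push c S hS, pvStep_replicate]
  ring_nf

-- KEY LEMMA: a run of length ≥ 3 on top of an admissible stack is invisible to B
theorem pvKey (v : List Char) (S : List (Char × Nat)) (c : Char) (m : Nat)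
    (hm : 3 ≤ m) (hS : pvOkUnder S c)
    (hv : v = [] ∨ ∃ e v', v = e :: v' ∧ e ≠ c) :
    pvRender (pvPeel (v.foldl pvStep ((c, m) :: S))) =
      pvRender (pvPeel (v.foldl pvStep S)) := by
  rcases hv with rfl | ⟨e, v', rfl, he⟩
  · simp only [List.foldl_nil]
    have h1 : pvPeel ((c, m) :: S) = S := by simp [pvPeel, hm]
    have h2 : pvPeel S = S := by
      rcases hS with h | ⟨d, k, r, h, hd, hk⟩
      · simp [h, pvPeel]
      · simp [h, pvPeel, show ¬ 3 ≤ k by omega]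
    rw [h1, h2]
  · have hstep : pvStep ((c, m) :: S) e = pvStep S e := by
      rcases hS with h | ⟨d, k, r, h, hd, hk⟩
      · simp [h, pvStep, Ne.symm he, hm]
      · subst h
        by_cases hde : d = e
        · simp [pvStep, Ne.symm he, hm, hde]
        · simp [pvStep, Ne.symm he, hm, hde, show ¬ 3 ≤ k by omega]
    simp only [List.foldl_cons, hstep]

-- the inner scan finds a constant run and stops at a boundary
theorem pvFindJ_spec (s : List Char) (i j : Nat) (hij : i < j) (hj : j ≤ s.length)
    (hconst : ∀ t, i ≤ t → t < j → s[t]? = s[i]?) :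
    (∀ t, i ≤ t → t < pvFindJ s i j → s[t]? = s[i]?) ∧
      (pvFindJ s i j = s.length ∨ s[pvFindJ s i j]? ≠ s[i]?) := by
  revert hij hj hconst
  fun_induction pvFindJ s i j with
  | case1 j h heq =>
    intro hij hj hconst
    refine ⟨fun t ht1 ht2 => ?_, Or.inl heq⟩
    rcases Nat.lt_or_ge t j with h' | h'
    · exact hconst t ht1 h'
    · have ht : t = j := by omega
      subst ht; exact h.2.symm
  | case2 j h hne ih =>
    intro hij hj hconst
    refine ih (by omega) (by omega) (fun t ht1 ht2 => ?_)
    rcases Nat.lt_or_ge t j with h' | h'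
    · exact hconst t ht1 h'
    · have ht : t = j := by omega
      subst ht; exact h.2.symm
  | case3 j h =>
    intro hij hj hconst
    refine ⟨hconst, ?_⟩
    rcases Nat.lt_or_ge j s.length with h' | h'
    · right; intro hc; exact h ⟨h', hc.symm⟩
    · left; omega

-- extracting the constant segment [i, J) as a replicate
theorem pvExtract (s : List Char) (i J : Nat) (c : Char) (hiJ : i ≤ J)
    (hJ : J ≤ s.length) (hconst : ∀ t, i ≤ t → t < J → s[t]? = some c) :
    s = s.take i ++ List.replicate (J - i) c ++ s.drop J := by
  have h3 : (s.drop i).drop (J - i) = s.drop J := by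
    rw [List.drop_drop]; congr 1; omega
  have h4 : (s.drop i).take (J - i) = List.replicate (J - i) c := by
    rw [List.eq_replicate_iff]
    refine ⟨by simp; omega, ?_⟩
    intro b hb
    obtain ⟨k, hk, hbk⟩ := List.mem_iff_getElem.mp hb
    have hklen : k < (s.drop i).length := by
      simp [List.length_take] at hk
      simp; omega
    have hkJ : k < J - i := by simp [List.length_take] at hk; omega
    rw [List.getElem_take, List.getElem_drop] at hbk
    have hc := hconst (i + k) (by omega) (by omega)
    rw [List.getElem?_eq_getElem (by simp at hklen ⊢; omega)] at hc
    simp at hc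
    rw [← hbk]
    exact hc
  calc s = s.take i ++ s.drop i := (List.take_append_drop i s).symm
    _ = s.take i ++ ((s.drop i).take (J - i) ++ (s.drop i).drop (J - i)) := by
        rw [List.take_append_drop, List.take_append_drop]
        exact (List.take_append_drop i s).symm
    _ = s.take i ++ List.replicate (J - i) c ++ s.drop J := by
        rw [h4, h3, List.append_assoc]

theorem pvTF_take (s : List Char) (i : Nat) (h : pvTF s i) :
    pvTF (s.take i) (s.take i).length := by
  intro t ht htr
  obtain ⟨c, h0, h1, h2⟩ := htr
  have l2 : t + 2 < (s.take i).length := (List.getElem?_eq_some_iff.mp h2).1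
  have hi : t + 2 < i := by simp at l2; omega
  refine h t (by omega) ⟨c, ?_, ?_, ?_⟩
  · rw [← List.getElem?_take_of_lt (by omega : t < i)]; exact h0
  · rw [← List.getElem?_take_of_lt (by omega : t + 1 < i)]; exact h1
  · rw [← List.getElem?_take_of_lt (by omega : t + 2 < i)]; exact h2

-- B does not see the deletion A performs
theorem pvB_removal (s : List Char) (i J : Nat) (c : Char)
    (hi : i ≤ s.length) (hJ : J ≤ s.length) (hm : 3 ≤ J - i)
    (hconst : ∀ t, i ≤ t → t < J → s[t]? = some c)
    (hrs : i = 0 ∨ s[i - 1]? ≠ s[i]?)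
    (hci : s[i]? = some c)
    (hbd : J = s.length ∨ s[J]? ≠ some c)
    (htf : pvTF s i) :
    pvB s = pvB (s.take i ++ s.drop J) := by
  have hdecomp := pvExtract s i J c (by omega) hJ hconst
  set u := s.take i with hu
  set v := s.drop J with hv
  have hulen : u.length = i := by rw [hu]; simp; omega
  have htfu : pvTF u u.length := pvTF_take s i htf
  have hle := pvRuns_le_two u htfu
  have hstacku : u.foldl pvStep [] = pvRuns u := pvStack_eq_runs u hle
  have hok : pvOkUnder (u.foldl pvStep []) c := by
    rw [hstacku]
    cases hru : pvRuns u with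
    | nil => exact Or.inl rfl
    | cons p r =>
      obtain ⟨d, k⟩ := p
      right
      refine ⟨d, k, r, rfl, ?_, ?_⟩
      · obtain ⟨hk1, w, hw⟩ := pvRuns_top u d k r hru
        have hne : u ≠ [] := by
          intro hnil; rw [hnil] at hru; simp [pvRuns] at hru
        have hi0 : i ≠ 0 := by
          intro h0; rw [h0] at hulen
          exact hne (List.eq_nil_of_length_eq_zero hulen)
        have hlast : u.getLast? = some d := by
          rw [hw, List.getLast?_append]
          simp [List.getLast?_replicate, show k ≠ 0 by omega]
        have hlast2 : u.getLast? = s[i - 1]? := by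
          rw [List.getLast?_eq_getElem?, hulen, hu,
            List.getElem?_take_of_lt (by omega)]
        rcases hrs with h0 | hne'
        · exact absurd h0 hi0
        · intro hdc
          apply hne'
          rw [← hlast2, hlast, hdc, hci]
      · have h2 := hle (d, k) (by simp [hru])
        simp only at h2
        omega
  have hvhead : v = [] ∨ ∃ e v', v = e :: v' ∧ e ≠ c := by
    rcases hbd with hJl | hJne
    · left; rw [hv, hJl]; simp
    · cases hvc : v with
      | nil => exact Or.inl rfl
      | cons e v' =>
        right
        refine ⟨e, v', rfl, ?_⟩
        have hv0 : v[0]? = s[J]? := by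
          rw [hv, List.getElem?_drop]
          simp
        rw [hvc] at hv0
        simp at hv0
        intro hec; rw [hec] at hv0; exact hJne hv0.symm
  unfold pvB
  conv_lhs => rw [hdecomp]
  rw [List.foldl_append, List.foldl_append, List.foldl_append,
    pvStep_run (J - i) (by omega) c (u.foldl pvStep []) hok]
  exact pvKey v (u.foldl pvStep []) c (J - i) hm hok hvhead

-- MAIN LEMMA: from any loop state whose prefix is triple-free and run-aligned,
-- A's loop computes B's answer
theorem pvLoopA_eq_pvB (s : List Char) (i : Nat) (hi : i ≤ s.length)
    (htf : pvTF s i) (hrs : i = 0 ∨ s[i - 1]? ≠ s[i]?) :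
    pvLoopA s i = pvB s := by
  revert hi htf hrs
  fun_induction pvLoopA s i with
  | case1 s i h j hcond ih =>
    intro hi htf hrs
    have hilen : i < s.length := by omega
    have hci : s[i]? = some (s[i]'hilen) := List.getElem?_eq_getElem hilen
    have hbase : ∀ t, i ≤ t → t < i + 1 → s[t]? = s[i]? := by
      intro t ht1 ht2
      have ht : t = i := by omega
      rw [ht]
    obtain ⟨hconst, hbd⟩ := pvFindJ_spec s i (i + 1) (by omega) (by omega) hbase
    have hge := pvFindJ_ge s i (i + 1)
    have hle' := pvFindJ_le s i (i + 1) (by omega)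
    have hj : j = pvFindJ s i (i + 1) := rfl
    rw [← hj] at hconst hbd hge hle'
    have hconst' : ∀ t, i ≤ t → t < j → s[t]? = some (s[i]'hilen) := by
      intro t h1 h2
      rw [hconst t h1 h2, hci]
    have hbd' : j = s.length ∨ s[j]? ≠ some (s[i]'hilen) := by
      rcases hbd with h' | h'
      · exact Or.inl h'
      · right; rw [← hci]; exact h'
    rw [ih (by omega) (fun t ht => absurd ht (by omega)) (Or.inl rfl)]
    exact (pvB_removal s i j (s[i]'hilen) (by omega) hle' (by omega) hconst' hrs
      hci hbd' htf).symm
  | case2 s i h j hcond ih =>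
    intro hi htf hrs
    have hilen : i < s.length := by omega
    have hci : s[i]? = some (s[i]'hilen) := List.getElem?_eq_getElem hilen
    have hbase : ∀ t, i ≤ t → t < i + 1 → s[t]? = s[i]? := by
      intro t ht1 ht2
      have ht : t = i := by omega
      rw [ht]
    obtain ⟨hconst, hbd⟩ := pvFindJ_spec s i (i + 1) (by omega) (by omega) hbase
    have hge := pvFindJ_ge s i (i + 1)
    have hle' := pvFindJ_le s i (i + 1) (by omega)
    have hj : j = pvFindJ s i (i + 1) := rfl
    rw [← hj] at hconst hbd hge hle'
    have hJi : j - i ≤ 2 := by omega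
    apply ih hle'
    · intro t ht htr
      rcases Nat.lt_or_ge t i with h' | h'
      · exact htf t h' htr
      · obtain ⟨c, h0, h1, h2⟩ := htr
        have hc : c = s[i]'hilen := by
          have hx := hconst t h' ht
          rw [h0, hci] at hx
          injection hx
        subst hc
        rcases Nat.lt_or_ge (t + 2) j with h2' | h2'
        · omega
        · rcases Nat.lt_or_ge (t + 1) j with h1' | h1'
          · have ht2 : t + 2 = j := by omega
            rcases hbd with hJl | hJne
            · rw [ht2, hJl] at h2; simp at h2
            · rw [ht2] at h2; rw [← hci] at h2; exact hJne h2
          · have ht1 : t + 1 = j := by omega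
            rcases hbd with hJl | hJne
            · rw [ht1, hJl] at h1; simp at h1
            · rw [ht1] at h1; rw [← hci] at h1; exact hJne h1
    · right
      have hprev : s[j - 1]? = s[i]? := hconst (j - 1) (by omega) (by omega)
      rcases hbd with hJl | hJne
      · rw [hprev, hci]
        have : s[j]? = none := by
          rw [List.getElem?_eq_none_iff]
          omega
        rw [this]
        simp
      · rw [hprev]
        exact fun hc => hJne hc.symm
  | case3 s i h =>
    intro hi htf hrs
    symm
    apply pvB_of_TF
    intro t ht htr
    rcases Nat.lt_or_ge t i with h' | h'
    · exact htf t h' htr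
    · obtain ⟨c, h0, h1, h2⟩ := htr
      have := (List.getElem?_eq_some_iff.mp h2).1
      omega

-- strings of length ≤ 2 are triple-free
theorem pvTF_short (s : List Char) (h : s.length ≤ 2) : pvTF s s.length := by
  intro t ht htr
  obtain ⟨c, h0, h1, h2⟩ := htr
  have := (List.getElem?_eq_some_iff.mp h2).1
  omega

-- ===== VERDICT (by name: the statement is the Claim_ definition above) =====
theorem simpStr_spec : Claim_equal_simpStr := by
  intro string _
  unfold Spec_simpStr simpStr simpStr_alt
  by_cases h : 2 < string.toList.length
  · rw [if_pos h, pvLoopA_eq_pvB string.toList 0 (by omega)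
      (fun t ht => absurd ht (by omega)) (Or.inl rfl)]
    rfl
  · rw [if_neg h]
    have hB := pvB_of_TF string.toList (pvTF_short string.toList (by omega))
    unfold pvB at hB
    rw [hB]
    simp
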